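-- pv_equiv track=rewrite | github.com/HelloSSIFI/HelloWorld | programmers/Lv3_선입_선출_스케줄링/s1_kcw0360.py | solution
-- ===== SOURCE A (Python) =====
-- def solution(n, cores):
--     if n <= len(cores):    # 작업량 보다 코어 수가 더 큰 경우
--         return n
--
--     n -= len(cores)    # 모든 코어에 작업 할당
--     l, r = 1, max(cores) * n    # l: 최소 시간, r: 최대 시간
--     while l < r:    # 이진 탐색을 통해 작업 소요 시간을 구함
--         mid = (l+r) // 2
--         temp = 0
--         for core in cores:
--             temp += mid // core
--
--         if temp >= n:
--             r = mid
--         else: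
--             l = mid + 1
--
--     n -= sum(map(lambda x: (r-1) // x, cores))    # 작업 완료 한시간 전 작업 할당 후 남은 작업량 체크
--
--     for i in range(len(cores)):    # 작업 완료 시간에 마지막 작업을 처리하는 코어 번호를 찾는다
--         if r % cores[i] == 0:
--             n -= 1
--             if n == 0:
--                 return i + 1
-- ===== SOURCE B (Python) =====
-- def solution(n, cores):
--     C = len(cores)
--     if n <= C:
--         return n
--     m = n - C
--     # exact work rate R = N/D with D = product(cores), N = sum(D // c)
--     D = 1
--     for c in cores:
--         D *= c
--     N = 0
--     for c in cores:
--         N += D // c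
--     def S(t):
--         return sum(t // c for c in cores)
--     # closed-form window (lo, hi] that must contain the finish time:
--     # S(lo) < m <= S(hi)
--     lo = (m * D + N - 1) // N - 1
--     hi = ((m + C - 1) * D + N - 1) // N
--     # the finish time is the smallest multiple of some core inside the window
--     # at which at least m follow-up jobs have started
--     cand = []
--     for c in cores:
--         for k in range(lo // c + 1, hi // c + 1):
--             cand.append(k * c)
--     r = min(t for t in cand if S(t) >= m)
--     rem = m - S(r - 1)
--     hits = [i for i, c in enumerate(cores) if r % c == 0]
--     return hits[rem - 1] + 1
-- ===== Notes on version B (the rewrite author's own statement) =====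
-- stated objective: alternative
-- what changed: A finds the finishing time by binary search over [1, max(cores)*n]; B computes a closed-form window from the exact aggregate work rate sum(1/c) (as an integer fraction over the product of cores), enumerates the few core-multiples inside that window, takes the smallest feasible one directly, and picks the answering core by indexing a filtered enumerate list instead of a counting loop.
-- outside the precondition, e.g. on solution(13, [8, -6, 3]): A returns 3, B returns 2; on solution(3, [2, -3]): A returns None, B returns 1
import Mathlib
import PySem

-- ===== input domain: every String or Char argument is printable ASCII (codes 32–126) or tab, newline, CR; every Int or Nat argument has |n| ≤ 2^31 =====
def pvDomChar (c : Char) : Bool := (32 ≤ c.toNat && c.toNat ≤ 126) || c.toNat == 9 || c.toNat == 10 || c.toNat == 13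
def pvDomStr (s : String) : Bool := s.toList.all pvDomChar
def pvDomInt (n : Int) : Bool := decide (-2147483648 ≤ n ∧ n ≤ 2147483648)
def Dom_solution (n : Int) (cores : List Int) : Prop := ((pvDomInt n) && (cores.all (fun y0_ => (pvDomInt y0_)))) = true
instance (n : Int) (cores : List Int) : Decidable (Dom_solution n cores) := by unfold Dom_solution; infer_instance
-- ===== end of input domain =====

-- B replaces A's binary search over time by a closed-form rational window plus direct
-- candidate enumeration (objective: alternative); equivalence is proved on Pre_ below.

-- ===== PORT A =====
-- while l < r: … — ported with fuel (a totality guard only; the supplied fuel suffices, see proofs)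
def aLoop : Nat → Int → Int → List Int → Int → Int
  | 0, _, r, _, _ => r
  | fuel+1, l, r, cores, n =>
    if l < r then
      let mid := PySem.Int.floordiv (l + r) 2
      let temp := cores.foldl (fun acc core => acc + PySem.Int.floordiv mid core) 0
      if temp ≥ n then aLoop fuel l mid cores n
      else aLoop fuel (mid + 1) r cores n
    else r

-- for i in range(len(cores)): … — structural recursion carrying the index i; Python falls
-- through returning None on inputs outside Pre_: 0 stands in for that non-int value there
def aFind : List Int → Int → Int → Int → Int
  | [], _, _, _ => 0
  | c :: cs, i, r, n =>
    if PySem.Int.mod r c = 0 then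
      if n - 1 = 0 then i + 1 else aFind cs (i + 1) r (n - 1)
    else aFind cs (i + 1) r n

def solution (n : Int) (cores : List Int) : Int :=
  if n ≤ PySem.List.len cores then n
  else
    let n1 := n - PySem.List.len cores
    let r0 := ((PySem.List.max? cores (fun x => x)).getD 0) * n1  -- max([]) raises: junk 0 outside Pre_
    let r := aLoop ((r0 - 1).toNat + 1) 1 r0 cores n1
    let n2 := n1 - (cores.map (fun x => PySem.Int.floordiv (r - 1) x)).sum
    aFind cores 0 r n2

-- ===== PORT B =====
-- S(t) of Source B: number of follow-up jobs started by time t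
def bS (cores : List Int) (t : Int) : Int := (cores.map (fun c => PySem.Int.floordiv t c)).sum

def solution_alt (n : Int) (cores : List Int) : Int :=
  let C := PySem.List.len cores
  if n ≤ C then n
  else
    let m := n - C
    let D := cores.foldl (fun acc c => acc * c) 1
    let N := cores.foldl (fun acc c => acc + PySem.Int.floordiv D c) 0
    let lo := PySem.Int.floordiv (m * D + N - 1) N - 1
    let hi := PySem.Int.floordiv ((m + C - 1) * D + N - 1) N
    let cand := cores.foldl (fun acc c =>
      acc ++ (PySem.List.pyRange (PySem.Int.floordiv lo c + 1) (PySem.Int.floordiv hi c + 1) 1).map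
        (fun k => k * c)) []
    -- min(...) raises on an empty generator: junk 0 outside Pre_
    let r := (PySem.List.min? (cand.filter (fun t => m ≤ bS cores t)) (fun t => t)).getD 0
    let rem := m - bS cores (r - 1)
    let hits := (PySem.List.enumerate cores 0).filterMap
      (fun p => if PySem.Int.mod r p.2 = 0 then some p.1 else none)
    -- hits[rem-1] raises IndexError when out of range: junk 0 outside Pre_
    (PySem.List.pyGet? hits (rem - 1)).getD 0 + 1

-- ===== PRECONDITION & SPEC =====
-- Pre_ restricts the n > len(cores) case to the task's natural domain: a nonempty list of
-- positive per-job durations.  Outside it A raises (max of [], ZeroDivisionError on a 0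
-- core) or usually falls off its final loop returning None (not an int); on some
-- negative-duration inputs A does return an int, but a negative per-job duration is
-- meaningless for this scheduling task, so those inputs stay excluded (see claim.json cites).
def Pre_solution (n : Int) (cores : List Int) : Prop :=
  n ≤ cores.length ∨ (cores ≠ [] ∧ ∀ c ∈ cores, 1 ≤ c)
instance (n : Int) (cores : List Int) : Decidable (Pre_solution n cores) := by
  unfold Pre_solution; infer_instance

def pvWitness_solution : Int × List Int := (7, [2, 3])

def Spec_solution (n : Int) (cores : List Int) (out : Int) : Prop := out = solution_alt n cores
instance (n : Int) (cores : List Int) (out : Int) : Decidable (Spec_solution n cores out) := by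
  unfold Spec_solution; infer_instance

-- ===== CLAIM (what is proved, stated in full; the proofs are below) =====
def Claim_equal_solution : Prop := ∀ (n : Int) (cores : List Int),
  Dom_solution n cores → Pre_solution n cores → Spec_solution n cores (solution n cores)

-- ===== LEMMAS AND PROOFS =====

theorem fd_bracket {x c : Int} (hc : 0 < c) :
    PySem.Int.floordiv x c * c ≤ x ∧ x < PySem.Int.floordiv x c * c + c := by
  have h := PySem.Int.floordiv_mul_add_mod x c
  have h1 := PySem.Int.mod_nonneg x hc
  have h2 := PySem.Int.mod_lt x hc
  omega

theorem fd_mono {a b c : Int} (hc : 0 < c) (hab : a ≤ b) :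
    PySem.Int.floordiv a c ≤ PySem.Int.floordiv b c := by
  rw [PySem.Int.le_floordiv_iff_mul_le hc]
  exact le_trans (fd_bracket hc).1 hab

theorem fd_nonneg {x c : Int} (hc : 0 < c) (hx : 0 ≤ x) : 0 ≤ PySem.Int.floordiv x c := by
  rw [PySem.Int.le_floordiv_iff_mul_le hc]; simpa using hx

theorem fd_zero {c : Int} (hc : 0 < c) : PySem.Int.floordiv 0 c = 0 := by
  have h1 := fd_nonneg hc (le_refl (0:Int))
  have h2 : PySem.Int.floordiv 0 c < 1 := by
    rw [PySem.Int.floordiv_lt_iff_lt_mul hc]; omega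
  omega

theorem bS_mono {cores : List Int} (hpos : ∀ c ∈ cores, 1 ≤ c) {a b : Int} (hab : a ≤ b) :
    bS cores a ≤ bS cores b := by
  unfold bS
  exact List.sum_le_sum (fun c hm => fd_mono (by have := hpos c hm; omega) hab)

theorem bS_zero {cores : List Int} (hpos : ∀ c ∈ cores, 1 ≤ c) : bS cores 0 = 0 := by
  unfold bS
  rw [List.sum_eq_zero]
  intro x hx
  obtain ⟨c, hc, rfl⟩ := List.mem_map.1 hx
  exact fd_zero (by have := hpos c hc; omega)

theorem bS_ge_member {cores : List Int} (hpos : ∀ c ∈ cores, 1 ≤ c) {c t : Int}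
    (hc : c ∈ cores) (ht : 0 ≤ t) : PySem.Int.floordiv t c ≤ bS cores t := by
  unfold bS
  apply List.single_le_sum
  · intro x hx
    obtain ⟨d, hd, rfl⟩ := List.mem_map.1 hx
    exact fd_nonneg (by have := hpos d hd; omega) ht
  · exact List.mem_map_of_mem hc

theorem fd_step {t c : Int} (hc : 0 < c) :
    PySem.Int.floordiv t c =
      PySem.Int.floordiv (t - 1) c + (if PySem.Int.mod t c = 0 then 1 else 0) := by
  by_cases h : PySem.Int.mod t c = 0
  · have hq : PySem.Int.floordiv t c * c = t := by
      have := PySem.Int.floordiv_mul_add_mod t c; omega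
    have : PySem.Int.floordiv (t - 1) c = PySem.Int.floordiv t c - 1 := by
      rw [PySem.Int.floordiv_eq_iff_of_pos hc]
      constructor <;> nlinarith
    simp [h, this]
  · have hmod := PySem.Int.floordiv_mul_add_mod t c
    have h1 := PySem.Int.mod_nonneg t hc
    have h2 := PySem.Int.mod_lt t hc
    have hge : 1 ≤ PySem.Int.mod t c := by omega
    have : PySem.Int.floordiv (t - 1) c = PySem.Int.floordiv t c := by
      rw [PySem.Int.floordiv_eq_iff_of_pos hc]
      constructor <;> nlinarith
    simp [h, this]

theorem bS_step {cores : List Int} (hpos : ∀ c ∈ cores, 1 ≤ c) (t : Int) :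
    bS cores t = bS cores (t - 1) +
      (cores.countP (fun c => decide (PySem.Int.mod t c = 0)) : Int) := by
  unfold bS
  rw [← PySem.List.sum_map_ite_one_zero (fun c => decide (PySem.Int.mod t c = 0)) cores,
    ← PySem.List.sum_map_add_int]
  apply congrArg
  apply List.map_congr_left
  intro c hc
  have := fd_step (t := t) (c := c) (by have := hpos c hc; omega)
  simp only [decide_eq_true_eq]
  omega

theorem fd_exact {c D : Int} (hdvd : c ∣ D) :
    PySem.Int.floordiv D c * c = D := by
  have := PySem.Int.floordiv_mul_add_mod D c
  have h0 : PySem.Int.mod D c = 0 := (PySem.Int.mod_eq_zero_iff_dvd D c).2 hdvd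
  omega

theorem fd_one_le {c D : Int} (hc : 0 < c) (hD : 0 < D) (hdvd : c ∣ D) :
    1 ≤ PySem.Int.floordiv D c := by
  rw [PySem.Int.le_floordiv_iff_mul_le hc]
  simpa using Int.le_of_dvd hD hdvd

theorem elem_lb {x c D : Int} (hc : 0 < c) (hdvd : c ∣ D) (hD : 0 < D) :
    PySem.Int.floordiv x c * D ≤ x * PySem.Int.floordiv D c := by
  have he := fd_exact hdvd
  have h1 := (fd_bracket (x := x) hc).1
  have hnn : 0 ≤ PySem.Int.floordiv D c := le_of_lt (lt_of_lt_of_le one_pos (fd_one_le hc hD hdvd))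
  calc PySem.Int.floordiv x c * D = (PySem.Int.floordiv x c * c) * PySem.Int.floordiv D c := by
        rw [mul_assoc, mul_comm c, he]
    _ ≤ x * PySem.Int.floordiv D c := mul_le_mul_of_nonneg_right h1 hnn

theorem elem_ub {x c D : Int} (hc : 0 < c) (hdvd : c ∣ D) (hD : 0 < D) :
    x * PySem.Int.floordiv D c ≤ PySem.Int.floordiv x c * D + (D - 1) := by
  have he := fd_exact hdvd
  have h2 := (fd_bracket (x := x) hc).2
  have h1 : 1 ≤ PySem.Int.floordiv D c := fd_one_le hc hD hdvd
  have hx1 : x ≤ PySem.Int.floordiv x c * c + c - 1 := by omega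
  calc x * PySem.Int.floordiv D c
      ≤ (PySem.Int.floordiv x c * c + c - 1) * PySem.Int.floordiv D c :=
        mul_le_mul_of_nonneg_right hx1 (by omega)
    _ = PySem.Int.floordiv x c * D + D - PySem.Int.floordiv D c := by
        rw [sub_mul, add_mul, mul_assoc, mul_comm c, he]; ring
    _ ≤ PySem.Int.floordiv x c * D + (D - 1) := by omega

theorem sum_lb {cores : List Int} (hpos : ∀ c ∈ cores, 1 ≤ c) (hD : 0 < cores.prod) (x : Int) :
    bS cores x * cores.prod ≤ x * bS cores cores.prod := by
  unfold bS
  rw [← List.sum_map_mul_right, ← List.sum_map_mul_left]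
  apply List.sum_le_sum
  intro c hcm
  exact elem_lb (by have := hpos c hcm; omega) (List.dvd_prod hcm) hD

theorem sum_ub {cores : List Int} (hpos : ∀ c ∈ cores, 1 ≤ c) (hD : 0 < cores.prod) (x : Int) :
    x * bS cores cores.prod ≤ bS cores x * cores.prod + (cores.length : Int) * (cores.prod - 1) := by
  unfold bS
  rw [← List.sum_map_mul_left, ← List.sum_map_mul_right,
    ← PySem.List.sum_map_const_int cores (cores.prod - 1), ← PySem.List.sum_map_add_int]
  apply List.sum_le_sum
  intro c hcm
  exact elem_ub (by have := hpos c hcm; omega) (List.dvd_prod hcm) hD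

theorem aLoop_spec {cores : List Int} (m : Int) :
    ∀ (fuel : Nat) (l r : Int), 1 ≤ l → l ≤ r → (r - l).toNat ≤ fuel →
    bS cores (l - 1) < m → m ≤ bS cores r →
    1 ≤ aLoop fuel l r cores m ∧ bS cores (aLoop fuel l r cores m - 1) < m ∧
      m ≤ bS cores (aLoop fuel l r cores m) := by
  intro fuel
  induction fuel with
  | zero =>
    intro l r h1 h2 h3 h4 h5
    have : l = r := by omega
    subst this
    simp only [aLoop]
    exact ⟨h1, h4, h5⟩
  | succ fuel ih =>
    intro l r h1 h2 h3 h4 h5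
    simp only [aLoop]
    by_cases hlr : l < r
    · rw [if_pos hlr, PySem.List.foldl_add]
      have hmid := PySem.Int.floordiv_two_mid_bounds (le_of_lt hlr)
      have hmidlt : PySem.Int.floordiv (l + r) 2 < r := by
        rw [PySem.Int.floordiv_lt_iff_lt_mul (by omega : (0:Int) < 2)]; omega
      have hbs : 0 + (List.map (fun core => PySem.Int.floordiv (PySem.Int.floordiv (l + r) 2) core) cores).sum
          = bS cores (PySem.Int.floordiv (l + r) 2) := by
        simp [bS]
      rw [hbs]
      by_cases htemp : bS cores (PySem.Int.floordiv (l + r) 2) ≥ m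
      · rw [if_pos htemp]
        exact ih l _ h1 hmid.1 (by omega) h4 htemp
      · rw [if_neg htemp]
        refine ih _ r (by omega) (by omega) (by omega)
          (by simpa using (by omega : bS cores (PySem.Int.floordiv (l + r) 2) < m)) h5
    · rw [if_neg hlr]
      have : l = r := by omega
      subst this
      exact ⟨h1, h4, h5⟩

theorem pyGet?_cons_pos {α : Type} (x : α) (xs : List α) {j : Int} (hj : 1 ≤ j) :
    PySem.List.pyGet? (x :: xs) j = PySem.List.pyGet? xs (j - 1) := by
  rw [PySem.List.pyGet?_of_nonneg (x :: xs) (by omega : (0:Int) ≤ j),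
    PySem.List.pyGet?_of_nonneg xs (by omega : (0:Int) ≤ j - 1)]
  have : j.toNat = (j - 1).toNat + 1 := by omega
  rw [this]
  simp

theorem final_eq (r : Int) : ∀ (cs : List Int) (i rem : Int), 1 ≤ rem →
    rem ≤ (cs.countP (fun c => decide (PySem.Int.mod r c = 0)) : Int) →
    aFind cs i r rem =
      (PySem.List.pyGet? ((PySem.List.enumerate cs i).filterMap
        (fun p => if PySem.Int.mod r p.2 = 0 then some p.1 else none)) (rem - 1)).getD 0 + 1 := by
  intro cs
  induction cs with
  | nil => intro i rem h1 h2; simp [List.countP] at h2; omega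
  | cons c cs ih =>
    intro i rem h1 h2
    rw [List.countP_cons] at h2
    simp only [PySem.List.enumerate, List.filterMap_cons]
    by_cases hdiv : PySem.Int.mod r c = 0
    · simp only [aFind, if_pos hdiv]
      by_cases hone : rem - 1 = 0
      · rw [if_pos hone]
        have : rem = 1 := by omega
        subst this
        simp
      · rw [if_neg hone]
        rw [ih (i + 1) (rem - 1) (by omega) (by simp [hdiv] at h2; omega)]
        rw [pyGet?_cons_pos _ _ (by omega : 1 ≤ rem - 1)]
    · simp only [aFind, if_neg hdiv]
      rw [ih (i + 1) rem h1 (by simp [hdiv] at h2; omega)]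

-- the two else-branches agree, for an arbitrary residual workload m ≥ 1
theorem branch_eq (cores : List Int) (m : Int) (hne : cores ≠ []) (hpos : ∀ c ∈ cores, 1 ≤ c)
    (hm1 : 1 ≤ m) :
    (let r0 := ((PySem.List.max? cores (fun x => x)).getD 0) * m
     let r := aLoop ((r0 - 1).toNat + 1) 1 r0 cores m
     aFind cores 0 r (m - (cores.map (fun x => PySem.Int.floordiv (r - 1) x)).sum))
    =
    (let D := cores.foldl (fun acc c => acc * c) 1
     let N := cores.foldl (fun acc c => acc + PySem.Int.floordiv D c) 0
     let lo := PySem.Int.floordiv (m * D + N - 1) N - 1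
     let hi := PySem.Int.floordiv ((m + (cores.length : Int) - 1) * D + N - 1) N
     let cand := cores.foldl (fun acc c =>
       acc ++ (PySem.List.pyRange (PySem.Int.floordiv lo c + 1) (PySem.Int.floordiv hi c + 1) 1).map
         (fun k => k * c)) []
     let r := (PySem.List.min? (cand.filter (fun t => m ≤ bS cores t)) (fun t => t)).getD 0
     let rem := m - bS cores (r - 1)
     let hits := (PySem.List.enumerate cores 0).filterMap
       (fun p => if PySem.Int.mod r p.2 = 0 then some p.1 else none)
     (PySem.List.pyGet? hits (rem - 1)).getD 0 + 1) := by
  dsimp only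
  set D := List.foldl (fun acc c => acc * c) 1 cores with hDdef
  set N := List.foldl (fun acc c => acc + PySem.Int.floordiv D c) 0 cores with hNdef
  set lo := PySem.Int.floordiv (m * D + N - 1) N - 1 with hlodef
  set hi := PySem.Int.floordiv ((m + (cores.length : Int) - 1) * D + N - 1) N with hhidef
  set cand := List.foldl (fun acc c =>
      acc ++ (PySem.List.pyRange (PySem.Int.floordiv lo c + 1) (PySem.Int.floordiv hi c + 1) 1).map
        (fun k => k * c)) [] cores with hcanddef
  set mx := (PySem.List.max? cores (fun x => x)).getD 0 with hmxdef
  set r0 := mx * m with hr0def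
  set rA := aLoop ((r0 - 1).toNat + 1) 1 r0 cores m with hrAdef
  set L := List.filter (fun t => decide (m ≤ bS cores t)) cand with hLdef
  set rB := (PySem.List.min? L (fun t => t)).getD 0 with hrBdef
  -- basic facts
  have hprod : D = cores.prod := by rw [hDdef, List.prod_eq_foldl]
  have hDpos : 0 < D := hprod ▸ List.prod_pos (fun c hc => by have := hpos c hc; omega)
  have hNbs : N = bS cores D := by rw [hNdef, PySem.List.foldl_add, zero_add]; rfl
  obtain ⟨c0, hc0m⟩ := List.exists_mem_of_ne_nil cores hne
  have hc0pos : (0:Int) < c0 := by have := hpos c0 hc0m; omega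
  have hN1 : 1 ≤ N := by
    rw [hNbs]
    exact le_trans (fd_one_le hc0pos hDpos (hprod ▸ List.dvd_prod hc0m))
      (bS_ge_member hpos hc0m hDpos.le)
  have hNpos : (0:Int) < N := by omega
  have hClen : 1 ≤ (cores.length : Int) := by
    have := List.length_pos_of_ne_nil hne; omega
  -- window bounds:  bS lo < m ≤ bS hi
  have hmD1 : 1 ≤ m * D := by nlinarith
  have hloN : lo * N ≤ m * D - 1 := by
    have hb := (fd_bracket (x := m * D + N - 1) hNpos).1
    rw [hlodef]; nlinarith
  have hlo0 : 0 ≤ lo := by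
    rw [hlodef]
    have h1 : 1 ≤ PySem.Int.floordiv (m * D + N - 1) N := by
      rw [PySem.Int.le_floordiv_iff_mul_le hNpos]; nlinarith
    omega
  have hSlo : bS cores lo < m := by
    have h1 := sum_lb hpos (hprod ▸ hDpos) lo
    rw [← hprod, ← hNbs] at h1
    have h2 : bS cores lo * D < m * D := by nlinarith
    exact lt_of_mul_lt_mul_right h2 hDpos.le
  have hhiN : (m + (cores.length : Int) - 1) * D ≤ hi * N := by
    have hb := (fd_bracket (x := (m + (cores.length : Int) - 1) * D + N - 1) hNpos).2
    rw [hhidef]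
    nlinarith
  have hShi : m ≤ bS cores hi := by
    have h1 := sum_ub hpos (hprod ▸ hDpos) hi
    rw [← hprod, ← hNbs] at h1
    have h2 : (m - 1) * D < bS cores hi * D := by nlinarith
    have := lt_of_mul_lt_mul_right h2 hDpos.le
    omega
  -- A's binary search returns the least feasible time rA
  obtain ⟨mxv, hmxv⟩ : ∃ v, PySem.List.max? cores (fun x => x) = some v := by
    cases h : PySem.List.max? cores (fun x => x) with
    | none => exact absurd ((PySem.List.max?_eq_none_iff cores _).1 h) hne
    | some v => exact ⟨v, rfl⟩
  have hmxval : mx = mxv := by rw [hmxdef, hmxv]; rfl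
  have hmxmem : mxv ∈ cores := PySem.List.max?_mem hmxv
  have hmx1 : 1 ≤ mxv := hpos _ hmxmem
  have hr01 : 1 ≤ r0 := by rw [hr0def, hmxval]; nlinarith
  have hflmx : PySem.Int.floordiv r0 mxv = m := by
    rw [PySem.Int.floordiv_eq_iff_of_pos (by omega)]
    rw [hr0def, hmxval]
    constructor <;> nlinarith
  have hbr0 : m ≤ bS cores r0 := hflmx ▸ bS_ge_member hpos hmxmem (by omega)
  have h00 : bS cores (1 - 1) < m := by
    norm_num [bS_zero hpos]; omega
  obtain ⟨hA1, hA2, hA3⟩ := aLoop_spec (cores := cores) m ((r0 - 1).toNat + 1) 1 r0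
    (le_refl 1) (by omega) (by omega) h00 hbr0
  rw [← hrAdef] at hA1 hA2 hA3
  -- rA lies in the window and is a multiple of some core
  have hlorA : lo < rA := by
    by_contra h
    push Not at h
    have := bS_mono hpos h
    omega
  have hrAhi : rA ≤ hi := by
    by_contra h
    push Not at h
    have : bS cores hi ≤ bS cores (rA - 1) := bS_mono hpos (by omega)
    omega
  have hstepA := bS_step hpos rA
  have hcnt1 : 0 < cores.countP (fun c => decide (PySem.Int.mod rA c = 0)) := by
    by_contra h
    push Not at h
    have h0 : cores.countP (fun c => decide (PySem.Int.mod rA c = 0)) = 0 := by omega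
    rw [h0] at hstepA
    norm_num at hstepA
    omega
  obtain ⟨cdiv, hcdivm, hcdivp⟩ := List.countP_pos_iff.1 hcnt1
  have hcdiv0 : (0:Int) < cdiv := by have := hpos cdiv hcdivm; omega
  have hdvd : cdiv ∣ rA := by
    rw [← PySem.Int.mod_eq_zero_iff_dvd]
    simpa using hcdivp
  -- membership of rA in the candidate pool
  have hcandflat : cand = cores.flatMap (fun c =>
      (PySem.List.pyRange (PySem.Int.floordiv lo c + 1) (PySem.Int.floordiv hi c + 1) 1).map
        (fun k => k * c)) := by
    rw [hcanddef, PySem.List.foldl_append_eq_flatMap]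
    rfl
  have hmemcand : ∀ t, t ∈ cand ↔ ∃ c ∈ cores, ∃ k,
      (PySem.Int.floordiv lo c < k ∧ k ≤ PySem.Int.floordiv hi c) ∧ t = k * c := by
    intro t
    rw [hcandflat]
    simp only [List.mem_flatMap, List.mem_map, PySem.List.mem_pyRange_one]
    constructor
    · rintro ⟨c, hc, k, ⟨hk1, hk2⟩, rfl⟩
      exact ⟨c, hc, k, ⟨by omega, by omega⟩, rfl⟩
    · rintro ⟨c, hc, k, ⟨hk1, hk2⟩, rfl⟩
      exact ⟨c, hc, k, ⟨by omega, by omega⟩, rfl⟩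
  have hrAcand : rA ∈ cand := by
    rw [hmemcand]
    refine ⟨cdiv, hcdivm, PySem.Int.floordiv rA cdiv, ⟨?_, ?_⟩, ?_⟩
    · rw [PySem.Int.floordiv_lt_iff_lt_mul hcdiv0]
      rw [fd_exact hdvd]
      exact hlorA
    · rw [PySem.Int.le_floordiv_iff_mul_le hcdiv0]
      rw [fd_exact hdvd]
      exact hrAhi
    · rw [fd_exact hdvd]
  have hrAL : rA ∈ L := by
    rw [hLdef, List.mem_filter]
    exact ⟨hrAcand, by simpa using hA3⟩
  -- the filtered minimum equals rA
  obtain ⟨rBv, hrBv⟩ : ∃ v, PySem.List.min? L (fun t => t) = some v := by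
    cases h : PySem.List.min? L (fun t => t) with
    | none =>
      rw [PySem.List.min?_eq_none_iff] at h
      rw [h] at hrAL
      exact absurd hrAL (List.not_mem_nil)
    | some v => exact ⟨v, rfl⟩
  have hrBval : rB = rBv := by rw [hrBdef, hrBv]; rfl
  have hrBle : rBv ≤ rA := PySem.List.min?_isMin hrBv rA hrAL
  have hrBmem : rBv ∈ L := PySem.List.min?_mem hrBv
  have hrBfacts : rBv ∈ cand ∧ m ≤ bS cores rBv := by
    rw [hLdef, List.mem_filter] at hrBmem
    exact ⟨hrBmem.1, by simpa using hrBmem.2⟩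
  have hrBlo : lo < rBv := by
    obtain ⟨c, hc, k, ⟨hk1, _⟩, rfl⟩ := (hmemcand rBv).1 hrBfacts.1
    have hc0 : (0:Int) < c := by have := hpos c hc; omega
    rw [← PySem.Int.floordiv_lt_iff_lt_mul hc0]
    exact hk1
  have hrBeq : rB = rA := by
    rw [hrBval]
    by_contra h
    have hlt : rBv ≤ rA - 1 := by omega
    have := bS_mono hpos hlt
    omega
  rw [hrBeq]
  -- both final scans pick the rem-th core dividing rA
  have hsum : (List.map (fun x => PySem.Int.floordiv (rA - 1) x) cores).sum
      = bS cores (rA - 1) := rfl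
  rw [hsum]
  exact final_eq rA cores 0 (m - bS cores (rA - 1)) (by omega) (by omega)

-- ===== VERDICT (by name: the statement is the Claim_ definition above) =====
theorem solution_spec : Claim_equal_solution := by
  intro n cores hdom hpre
  unfold Spec_solution
  simp only [solution, solution_alt, PySem.List.len_eq]
  by_cases hle : n ≤ (cores.length : Int)
  · rw [if_pos hle, if_pos hle]
  rw [if_neg hle, if_neg hle]
  have hne : cores ≠ [] := by
    rcases hpre with h | h
    · exfalso; exact hle h
    · exact h.1
  have hpos : ∀ c ∈ cores, 1 ≤ c := by
    rcases hpre with h | h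
    · exfalso; exact hle h
    · exact h.2
  have hlen : 0 < cores.length := List.length_pos_of_ne_nil hne
  exact branch_eq cores (n - (cores.length : Int)) hne hpos (by omega)
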